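-- pv_equiv track=rewrite | github.com/abu-kausar/POC-table-masking | utils/merge_texts.py | merge_boxes
-- ===== SOURCE A (Python) =====
-- def merge_boxes(boxes):
--     xs, ys = [], []
--     for box in boxes:
--         for x, y in box:
--             xs.append(x)
--             ys.append(y)
--
--     x_min, x_max = min(xs), max(xs)
--     y_min, y_max = min(ys), max(ys)
--
--     return [
--         [x_min, y_min],
--         [x_max, y_min],
--         [x_max, y_max],
--         [x_min, y_max],
--     ]
-- ===== SOURCE B (Python) =====
-- def merge_boxes(boxes):
--     seen = False
--     for box in boxes:
--         for x, y in box: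
--             if not seen:
--                 x_min = x_max = x
--                 y_min = y_max = y
--                 seen = True
--             else:
--                 if x < x_min:
--                     x_min = x
--                 if x > x_max:
--                     x_max = x
--                 if y < y_min:
--                     y_min = y
--                 if y > y_max:
--                     y_max = y
--     if not seen:
--         raise ValueError("merge_boxes: no points")
--     return [
--         [x_min, y_min],
--         [x_max, y_min],
--         [x_max, y_max],
--         [x_min, y_max],
--     ]
-- ===== Notes on version B (the rewrite author's own statement) =====
-- stated objective: simpler
-- what changed: B computes the running min/max of x and y in a single pass over the points instead of building the xs/ys lists and scanning each twice with min()/max().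
import Mathlib
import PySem

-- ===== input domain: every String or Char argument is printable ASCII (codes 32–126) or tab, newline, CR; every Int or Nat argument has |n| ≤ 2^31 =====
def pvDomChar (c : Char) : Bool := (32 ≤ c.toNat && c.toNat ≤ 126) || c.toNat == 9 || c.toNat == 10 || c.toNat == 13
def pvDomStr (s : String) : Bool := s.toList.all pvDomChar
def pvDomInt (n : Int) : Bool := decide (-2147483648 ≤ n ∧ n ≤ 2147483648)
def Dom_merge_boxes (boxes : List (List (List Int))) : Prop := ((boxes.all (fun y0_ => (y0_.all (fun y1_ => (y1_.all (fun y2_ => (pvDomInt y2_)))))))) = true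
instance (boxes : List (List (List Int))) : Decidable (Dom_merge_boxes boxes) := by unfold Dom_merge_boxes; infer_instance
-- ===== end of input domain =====

-- B replaces A's xs/ys list building plus four min/max scans by a single pass keeping running x_min/x_max/y_min/y_max (objective: simpler, O(1) extra space; same asymptotic time).

-- shared helpers: the tuple unpacking 'for x, y in box' (Pre_ guarantees each point has exactly 2 coordinates)
def ptX (p : List Int) : Int := p.headD 0
def ptY (p : List Int) : Int := p.getD 1 0

-- ===== PORT A =====
def merge_boxes (boxes : List (List (List Int))) : List (List Int) :=
  let xys := boxes.foldl (fun acc box =>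
    box.foldl (fun a p => (a.1 ++ [ptX p], a.2 ++ [ptY p])) acc) (([] : List Int), ([] : List Int))
  match PySem.List.min? xys.1 (fun v => v), PySem.List.max? xys.1 (fun v => v),
        PySem.List.min? xys.2 (fun v => v), PySem.List.max? xys.2 (fun v => v) with
  | some xmin, some xmax, some ymin, some ymax =>
      [[xmin, ymin], [xmax, ymin], [xmax, ymax], [xmin, ymax]]
  | _, _, _, _ => []   -- unreachable under Pre_ (Python raises ValueError: min of empty list)

-- ===== PORT B =====
-- state: none = no point seen yet; some (x_min, x_max, y_min, y_max)
def bstep (s : Option (Int × Int × Int × Int)) (p : List Int) : Option (Int × Int × Int × Int) :=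
  let x := ptX p
  let y := ptY p
  match s with
  | none => some (x, x, y, y)
  | some (a, b, c, d) =>
      some ((if x < a then x else a), (if x > b then x else b),
            (if y < c then y else c), (if y > d then y else d))

def merge_boxes_alt (boxes : List (List (List Int))) : List (List Int) :=
  match boxes.foldl (fun s box => box.foldl bstep s) none with
  | some (a, b, c, d) => [[a, c], [b, c], [b, d], [a, d]]
  | none => []   -- unreachable under Pre_ (Python B raises ValueError)

-- ===== PRECONDITION & SPEC =====
-- Pre_ excludes inputs with no point at all (min([]) raises ValueError in A, B raises too)
-- and points that are not 2-element (the unpacking 'for x, y in box' raises in both).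
def Pre_merge_boxes (boxes : List (List (List Int))) : Prop :=
  boxes.flatMap id ≠ [] ∧ ∀ box ∈ boxes, ∀ p ∈ box, p.length = 2
instance (boxes : List (List (List Int))) : Decidable (Pre_merge_boxes boxes) := by unfold Pre_merge_boxes; infer_instance
def pvWitness_merge_boxes : List (List (List Int)) := [[[0, 1], [5, -2]], [[3, 3]]]

def Spec_merge_boxes (boxes : List (List (List Int))) (out : List (List Int)) : Prop := out = merge_boxes_alt boxes
instance (boxes : List (List (List Int))) (out : List (List Int)) : Decidable (Spec_merge_boxes boxes out) := by unfold Spec_merge_boxes; infer_instance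

-- ===== CLAIM (what is proved, stated in full; the proofs are below) =====
def Claim_equal_merge_boxes : Prop := ∀ (boxes : List (List (List Int))), Dom_merge_boxes boxes → Pre_merge_boxes boxes → Spec_merge_boxes boxes (merge_boxes boxes)

-- ===== LEMMAS AND PROOFS =====

theorem if_lt_eq_min (a x : Int) : (if x < a then x else a) = min a x := by
  rw [min_def]; split_ifs <;> omega

theorem if_gt_eq_max (a x : Int) : (if x > a then x else a) = max a x := by
  rw [max_def]; split_ifs <;> omega

-- A's nested appending loop builds the x- and y-coordinate lists of all points in order
theorem mergeA_lists (boxes : List (List (List Int))) :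
    boxes.foldl (fun acc box =>
      box.foldl (fun a p => (a.1 ++ [ptX p], a.2 ++ [ptY p])) acc) (([] : List Int), ([] : List Int))
    = ((boxes.flatMap id).map ptX, (boxes.flatMap id).map ptY) := by
  rw [PySem.List.foldl_congr_mem (g := fun acc box => (acc.1 ++ List.map ptX box, acc.2 ++ List.map ptY box))]
  · rw [PySem.List.foldl_prod_mk (f := fun a box => a ++ List.map ptX box) (g := fun a box => a ++ List.map ptY box)]
    rw [PySem.List.foldl_append_eq_flatMap, PySem.List.foldl_append_eq_flatMap]
    simp [List.flatMap_def]
  · intro acc box _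
    rw [PySem.List.foldl_prod_mk (f := fun a p => a ++ [ptX p]) (g := fun a p => a ++ [ptY p])]
    rw [PySem.List.foldl_append_singleton_eq_map, PySem.List.foldl_append_singleton_eq_map]

-- B's nested loop is a single fold over the flattened point list
theorem mergeB_flat (boxes : List (List (List Int))) (init : Option (Int × Int × Int × Int)) :
    boxes.foldl (fun s box => box.foldl bstep s) init = (boxes.flatMap id).foldl bstep init := by
  induction boxes generalizing init with
  | nil => rfl
  | cons b t ih => simp [List.foldl_cons, ih, List.foldl_append]

-- B's accumulator tracks the running min/max of the coordinate projections
theorem bfold_minmax (t : List (List Int)) (a b c d : Int) :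
    t.foldl bstep (some (a, b, c, d)) =
      some ((t.map ptX).foldl min a, (t.map ptX).foldl max b,
            (t.map ptY).foldl min c, (t.map ptY).foldl max d) := by
  induction t generalizing a b c d with
  | nil => rfl
  | cons p t ih =>
      simp only [List.foldl_cons, List.map_cons, bstep]
      rw [if_lt_eq_min, if_gt_eq_max, if_lt_eq_min, if_gt_eq_max, ih]

-- ===== VERDICT (by name: the statement is the Claim_ definition above) =====
theorem merge_boxes_spec : Claim_equal_merge_boxes := by
  intro boxes _ hpre
  obtain ⟨hne, -⟩ := hpre
  unfold Spec_merge_boxes merge_boxes merge_boxes_alt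
  rw [mergeA_lists, mergeB_flat]
  obtain ⟨p, t, hpt⟩ := List.exists_cons_of_ne_nil hne
  rw [hpt]
  simp only [List.map_cons, List.foldl_cons]
  show (match PySem.List.min? (ptX p :: t.map ptX) (fun v => v), PySem.List.max? (ptX p :: t.map ptX) (fun v => v),
              PySem.List.min? (ptY p :: t.map ptY) (fun v => v), PySem.List.max? (ptY p :: t.map ptY) (fun v => v) with
        | some xmin, some xmax, some ymin, some ymax =>
            [[xmin, ymin], [xmax, ymin], [xmax, ymax], [xmin, ymax]]
        | _, _, _, _ => []) = _
  rw [PySem.List.min?_id_cons, PySem.List.max?_id_cons, PySem.List.min?_id_cons, PySem.List.max?_id_cons]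
  rw [show bstep none p = some (ptX p, ptX p, ptY p, ptY p) from rfl, bfold_minmax]
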